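-- pv_equiv track=rewrite | github.com/18DPEL/cement_bag_Counting | person_input.py | corner_hit
-- ===== SOURCE A (Python) =====
-- def corner_hit(pt, r, size=10):
--     if r is None:
--         return None
--     x, y = pt
--     x1, y1, x2, y2 = r
--     corners = {
--         'tl': (x1, y1),
--         'tr': (x2, y1),
--         'bl': (x1, y2),
--         'br': (x2, y2),
--     }
--     for name, (cx, cy) in corners.items():
--         if abs(x - cx) <= size and abs(y - cy) <= size:
--             return name
--     return None
-- ===== SOURCE B (Python) =====
-- def corner_hit(pt, r, size=10):
--     if r is None:
--         return None
--     x, y = pt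
--     x1, y1, x2, y2 = r
--     # Decide each axis independently, then build the corner name by concatenation.
--     v = 't' if abs(y - y1) <= size else 'b' if abs(y - y2) <= size else None
--     h = 'l' if abs(x - x1) <= size else 'r' if abs(x - x2) <= size else None
--     if v is not None and h is not None:
--         return v + h
--     return None
-- ===== Notes on version B (the rewrite author's own statement) =====
-- stated objective: alternative
-- what changed: Instead of enumerating four corners and testing each, B makes two independent per-axis decisions (top/bottom letter and left/right letter) and concatenates them into the corner name, returning None if either axis has no match; the prefer-first letter on each axis reproduces A's tl>tr>bl>br priority.
import Mathlib
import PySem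

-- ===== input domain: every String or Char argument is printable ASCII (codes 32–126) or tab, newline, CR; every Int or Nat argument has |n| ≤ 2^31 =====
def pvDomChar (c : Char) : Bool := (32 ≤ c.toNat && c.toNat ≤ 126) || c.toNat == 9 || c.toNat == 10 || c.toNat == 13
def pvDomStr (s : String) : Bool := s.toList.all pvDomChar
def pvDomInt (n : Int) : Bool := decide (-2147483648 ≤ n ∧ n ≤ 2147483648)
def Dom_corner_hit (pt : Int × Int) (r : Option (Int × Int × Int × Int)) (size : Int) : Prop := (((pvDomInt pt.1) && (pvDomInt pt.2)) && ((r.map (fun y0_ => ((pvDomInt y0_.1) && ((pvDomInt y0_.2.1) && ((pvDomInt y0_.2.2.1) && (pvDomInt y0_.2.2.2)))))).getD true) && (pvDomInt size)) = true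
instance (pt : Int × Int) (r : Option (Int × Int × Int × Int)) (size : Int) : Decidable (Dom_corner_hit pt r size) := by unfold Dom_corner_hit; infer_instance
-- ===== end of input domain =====

-- B decides each axis independently and concatenates the letters into the corner name
-- (objective: alternative decomposition, same O(1) cost).

-- ===== PORT A =====
-- A's loop over the insertion-ordered corner dict, taking the first matching corner.
def corner_hit (pt : Int × Int) (r : Option (Int × Int × Int × Int)) (size : Int) : Option String :=
  match r with
  | none => none
  | some (x1, y1, x2, y2) =>
    let x := pt.1
    let y := pt.2
    let corners : List (String × (Int × Int)) :=
      [("tl", (x1, y1)), ("tr", (x2, y1)), ("bl", (x1, y2)), ("br", (x2, y2))]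
    corners.findSome? (fun c =>
      if |x - c.2.1| ≤ size ∧ |y - c.2.2| ≤ size then some c.1 else none)

-- ===== PORT B =====
def corner_hit_alt (pt : Int × Int) (r : Option (Int × Int × Int × Int)) (size : Int) : Option String :=
  match r with
  | none => none
  | some (x1, y1, x2, y2) =>
    let x := pt.1
    let y := pt.2
    let v : Option String :=
      if |y - y1| ≤ size then some "t" else if |y - y2| ≤ size then some "b" else none
    let h : Option String :=
      if |x - x1| ≤ size then some "l" else if |x - x2| ≤ size then some "r" else none
    match v, h with
    | some a, some b => some (a ++ b)
    | _, _ => none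

-- ===== PRECONDITION & SPEC =====
def Spec_corner_hit (pt : Int × Int) (r : Option (Int × Int × Int × Int)) (size : Int) (out : Option String) : Prop := out = corner_hit_alt pt r size
instance (pt : Int × Int) (r : Option (Int × Int × Int × Int)) (size : Int) (out : Option String) : Decidable (Spec_corner_hit pt r size out) := by unfold Spec_corner_hit; infer_instance

-- ===== CLAIM (what is proved, stated in full; the proofs are below) =====
def Claim_equal_corner_hit : Prop := ∀ (pt : Int × Int) (r : Option (Int × Int × Int × Int)) (size : Int), Dom_corner_hit pt r size → Spec_corner_hit pt r size (corner_hit pt r size)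

-- ===== LEMMAS AND PROOFS =====

-- ===== VERDICT (by name: the statement is the Claim_ definition above) =====
theorem corner_hit_spec : Claim_equal_corner_hit := by
  intro pt r size _
  unfold Spec_corner_hit corner_hit corner_hit_alt
  cases r with
  | none => rfl
  | some q =>
    obtain ⟨x1, y1, x2, y2⟩ := q
    simp only [List.findSome?]
    split_ifs <;> simp_all
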